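-- pv_equiv track=rewrite | github.com/KumarAbhinav2/CodingProblems | Arrays/largestGroup(LT-1399).py | largestGroup
-- ===== SOURCE A (Python) =====
-- from collections import defaultdict
--
-- def largestGroup(num):
--     # range given is 0 - 10000, max number is 9999 ...so total groups possible 36(9+9+9+9).
--     mymap = defaultdict(list)
--     def digitSum(n):
--         s = 0
--         while n:
--             q, r = divmod(n, 10)
--             s+=r
--             n = q
--         return s
--     for i in range(1, num+1):
--         mymap[digitSum(i)].append(i)
--     max_size, max_groups = 0, 0
--     for d_sum in mymap:
--         curr_size = len(mymap[d_sum])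
--         if curr_size > max_size:
--             max_size = curr_size
--             max_groups = 1
--         elif curr_size == max_size:
--             max_groups +=1
--     return max_groups
-- ===== SOURCE B (Python) =====
-- def largestGroup(num):
--     if num <= 0:
--         return 0
--
--     def digit_sum(n):
--         s = 0
--         while n:
--             s += n % 10
--             n //= 10
--         return s
--
--     def counts_below(n):
--         # counts_below(n)[s] == |{ i in [0, n) : digit_sum(i) == s }| for each s in 0..90
--         if n == 0:
--             return [0] * 91
--         q, r = divmod(n, 10)
--         prev = counts_below(q)
--         dq = digit_sum(q)
--         return [sum(prev[s - d] for d in range(10) if d <= s)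
--                 + (1 if dq <= s < dq + r else 0)
--                 for s in range(91)]
--
--     c = counts_below(num + 1)   # digit-sum counts over [0, num]
--     c[0] -= 1                   # drop i = 0
--     m = max(c)
--     return sum(1 for v in c if v == m)
-- ===== Notes on version B (the rewrite author's own statement) =====
-- stated objective: faster
-- what changed: Replaces enumerating all integers 1..num into digit-sum buckets with a digit DP that counts the integers of each digit sum directly from the decimal digits of num, then takes the max count and its tie count.
import Mathlib
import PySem

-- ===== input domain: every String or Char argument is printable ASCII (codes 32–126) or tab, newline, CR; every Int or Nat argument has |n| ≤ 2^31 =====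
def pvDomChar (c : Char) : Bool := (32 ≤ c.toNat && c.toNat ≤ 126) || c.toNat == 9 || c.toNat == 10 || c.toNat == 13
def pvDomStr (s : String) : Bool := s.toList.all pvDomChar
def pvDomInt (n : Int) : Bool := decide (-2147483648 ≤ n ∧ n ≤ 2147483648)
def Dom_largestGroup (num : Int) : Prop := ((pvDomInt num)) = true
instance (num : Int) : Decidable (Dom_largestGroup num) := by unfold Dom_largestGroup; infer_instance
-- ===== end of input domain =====

-- B replaces A's enumeration of 1..num into digit-sum buckets by a digit DP over the
-- decimal digits of num (counts per digit sum 0..90, then max size and tie count): faster.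

-- ===== PORT A =====
-- A's inner digitSum: 'while n: q, r = divmod(n, 10); s += r; n = q'.
-- The guard 'n ≤ 0' only totalizes the recursion (Python tests 'n != 0' and A calls it on positives only).
def digitSumAGo : Nat → Int → Int
  | 0, _ => 0
  | fuel + 1, n =>
    if n ≤ 0 then 0
    else PySem.Int.mod n 10 + digitSumAGo fuel (PySem.Int.floordiv n 10)

def digitSumA (n : Int) : Int := digitSumAGo n.toNat n

def largestGroup (num : Int) : Int :=
  let mymap : PySem.Dict Int (List Int) :=
    (PySem.List.pyRange 1 (num + 1) 1).foldl
      (fun d i => d.modify (digitSumA i) [] (fun l => l ++ [i])) PySem.Dict.empty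
  let p : Int × Int :=
    mymap.keys.foldl
      (fun (p : Int × Int) s =>
        let curr : Int := ((mymap.getD s []).length : Int)
        if curr > p.1 then (curr, 1)
        else if curr = p.1 then (p.1, p.2 + 1)
        else p)
      (0, 0)
  p.2

-- ===== PORT B =====
-- B's digit_sum: 'while n: s += n % 10; n //= 10' (same totalizing guard as above).
def digitSumBGo : Nat → Int → Int
  | 0, _ => 0
  | fuel + 1, n =>
    if n ≤ 0 then 0
    else PySem.Int.mod n 10 + digitSumBGo fuel (PySem.Int.floordiv n 10)

def digitSumB (n : Int) : Int := digitSumBGo n.toNat n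

-- B's counts_below: digit DP, counts_below(n)[s] = #{i in [0,n) : digit_sum(i) = s} for s in 0..90.
-- The guard 'n ≤ 0' is the Python 'n == 0' base case (counts_below is never called with negative n).
def countsBelowGo : Nat → Int → List Int
  | 0, _ => List.replicate 91 0
  | fuel + 1, n =>
    if n ≤ 0 then List.replicate 91 0
    else
      let q := PySem.Int.floordiv n 10
      let r := PySem.Int.mod n 10
      let prev := countsBelowGo fuel q
      let dq := digitSumB q
      (PySem.List.pyRange 0 91 1).map (fun s =>
        (((PySem.List.pyRange 0 10 1).filter (fun d => decide (d ≤ s))).map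
            (fun d => PySem.List.pyGetD prev (s - d) 0)).sum
        + (if dq ≤ s ∧ s < dq + r then 1 else 0))

def countsBelow (n : Int) : List Int := countsBelowGo n.toNat n

def largestGroup_alt (num : Int) : Int :=
  if num ≤ 0 then 0
  else
    let c0 := countsBelow (num + 1)
    let c := c0.set 0 (PySem.List.pyGetD c0 0 0 - 1)
    let m := (PySem.List.max? c (fun v => v)).getD 0
    ((c.count m : Nat) : Int)

-- ===== PRECONDITION & SPEC =====
def Spec_largestGroup (num : Int) (out : Int) : Prop := out = largestGroup_alt num
instance (num : Int) (out : Int) : Decidable (Spec_largestGroup num out) := by unfold Spec_largestGroup; infer_instance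

-- ===== CLAIM (what is proved, stated in full; the proofs are below) =====
def Claim_equal_largestGroup : Prop := ∀ (num : Int), Dom_largestGroup num → Spec_largestGroup num (largestGroup num)

-- ===== LEMMAS AND PROOFS =====

-- digit sum on Nat: the mathematical object both ports are reduced to
def dsumN (n : Nat) : Nat :=
  if n = 0 then 0 else dsumN (n / 10) + n % 10
decreasing_by exact Nat.div_lt_self (by omega) (by omega)

-- number of i ∈ [0, n) with digit sum s
def cntN (n s : Nat) : Nat := (List.range n).countP (fun i => dsumN i == s)

theorem dsumN_zero : dsumN 0 = 0 := by rw [dsumN]; simp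

theorem dsumN_step (n : Nat) : dsumN n = dsumN (n / 10) + n % 10 := by
  by_cases h : n = 0
  · subst h; simp [dsumN_zero]
  · rw [dsumN, if_neg h]

theorem digitSumAGo_cast (fuel : Nat) : ∀ m : Nat, m ≤ fuel →
    digitSumAGo fuel (m : Int) = (dsumN m : Int) := by
  induction fuel with
  | zero =>
    intro m hm
    have hm0 : m = 0 := by omega
    subst hm0
    rw [show digitSumAGo 0 ((0 : Nat) : Int) = 0 from rfl, dsumN_zero]
    norm_num
  | succ fuel ih =>
    intro m hm
    by_cases h : m = 0
    · subst h
      simp only [Nat.cast_zero, digitSumAGo]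
      rw [if_pos le_rfl, dsumN_zero]
      norm_num
    · have hpos : 0 < m := Nat.pos_of_ne_zero h
      have hneg : ¬ ((m : Int) ≤ 0) := by omega
      simp only [digitSumAGo]
      rw [if_neg hneg]
      have hf : PySem.Int.floordiv (m : Int) 10 = ((m / 10 : Nat) : Int) := by
        exact_mod_cast PySem.Int.floordiv_natCast m 10
      have hmm : PySem.Int.mod (m : Int) 10 = ((m % 10 : Nat) : Int) := by
        exact_mod_cast PySem.Int.mod_natCast m 10
      have hlt := Nat.div_lt_self hpos (by norm_num : 1 < 10)
      rw [hf, hmm, ih (m / 10) (by omega), dsumN_step m]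
      push_cast
      ring

theorem digitSumA_cast (n : Nat) : digitSumA (n : Int) = (dsumN n : Int) := by
  unfold digitSumA
  rw [Int.toNat_natCast]
  exact digitSumAGo_cast n n le_rfl

theorem digitSumBGo_cast (fuel : Nat) : ∀ m : Nat, m ≤ fuel →
    digitSumBGo fuel (m : Int) = (dsumN m : Int) := by
  induction fuel with
  | zero =>
    intro m hm
    have hm0 : m = 0 := by omega
    subst hm0
    rw [show digitSumBGo 0 ((0 : Nat) : Int) = 0 from rfl, dsumN_zero]
    norm_num
  | succ fuel ih =>
    intro m hm
    by_cases h : m = 0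
    · subst h
      simp only [Nat.cast_zero, digitSumBGo]
      rw [if_pos le_rfl, dsumN_zero]
      norm_num
    · have hpos : 0 < m := Nat.pos_of_ne_zero h
      have hneg : ¬ ((m : Int) ≤ 0) := by omega
      simp only [digitSumBGo]
      rw [if_neg hneg]
      have hf : PySem.Int.floordiv (m : Int) 10 = ((m / 10 : Nat) : Int) := by
        exact_mod_cast PySem.Int.floordiv_natCast m 10
      have hmm : PySem.Int.mod (m : Int) 10 = ((m % 10 : Nat) : Int) := by
        exact_mod_cast PySem.Int.mod_natCast m 10
      have hlt := Nat.div_lt_self hpos (by norm_num : 1 < 10)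
      rw [hf, hmm, ih (m / 10) (by omega), dsumN_step m]
      push_cast
      ring

theorem digitSumB_cast (n : Nat) : digitSumB (n : Int) = (dsumN n : Int) := by
  unfold digitSumB
  rw [Int.toNat_natCast]
  exact digitSumBGo_cast n n le_rfl

theorem dsumN_le (k : Nat) : ∀ n, n < 10 ^ k → dsumN n ≤ 9 * k := by
  induction k with
  | zero =>
    intro n h
    have : n = 0 := by omega
    subst this
    simp [dsumN_zero]
  | succ k ih =>
    intro n h
    have hd : n / 10 < 10 ^ k := by
      rw [Nat.div_lt_iff_lt_mul (by norm_num)]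
      calc n < 10 ^ (k + 1) := h
        _ = 10 ^ k * 10 := by ring
    have h1 := ih (n / 10) hd
    have h2 : n % 10 ≤ 9 := by omega
    rw [dsumN_step]
    omega

theorem countP_range_shift (r a s : Nat) :
    (List.range r).countP (fun d => a + d == s) = if a ≤ s ∧ s < a + r then 1 else 0 := by
  induction r with
  | zero => simp
  | succ r ih =>
    rw [List.range_succ, List.countP_append, ih, List.countP_singleton]
    simp only [beq_iff_eq]
    split_ifs <;> omega

-- countP congruence on members (Bool-valued predicates)
theorem countP_congr_mem {α : Type} (l : List α) (p q : α → Bool) (h : ∀ a ∈ l, p a = q a) :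
    l.countP p = l.countP q := by
  induction l with
  | nil => rfl
  | cons x t ih =>
    rw [List.countP_cons, List.countP_cons, h x (List.mem_cons_self), ih (fun a ha => h a (List.mem_cons_of_mem _ ha))]

-- KEY: the digit-DP recurrence for cntN
theorem cntN_rec (n s : Nat) :
    cntN n s = ((List.range 10).map (fun d => (List.range (n / 10)).countP
        (fun p => dsumN p + d == s))).sum
      + (List.range (n % 10)).countP (fun d => dsumN (n / 10) + d == s) := by
  induction n with
  | zero =>
    simp only [Nat.zero_div, Nat.zero_mod, List.range_zero, List.countP_nil]
    simp [cntN, List.map_const']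
  | succ n ih =>
    have hstep : cntN (n + 1) s = cntN n s + (if dsumN n == s then 1 else 0) := by
      unfold cntN
      rw [List.range_succ, List.countP_append, List.countP_singleton]
    have hS : ∀ m, ((List.range 10).map (fun d => (List.range (m + 1)).countP
          (fun p => dsumN p + d == s))).sum
        = ((List.range 10).map (fun d => (List.range m).countP (fun p => dsumN p + d == s))).sum
          + (List.range 10).countP (fun d => dsumN m + d == s) := by
      intro m
      have hpt : ∀ d : Nat, (List.range (m + 1)).countP (fun p => dsumN p + d == s)
          = (List.range m).countP (fun p => dsumN p + d == s)
            + (if (dsumN m + d == s) then 1 else 0) := by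
        intro d
        rw [List.range_succ, List.countP_append, List.countP_singleton]
      rw [List.map_congr_left (fun d _ => hpt d), List.sum_map_add,
        PySem.List.sum_map_ite_one_zero_nat]
    by_cases h9 : n % 10 = 9
    · have h1 : (n + 1) / 10 = n / 10 + 1 := by omega
      have h2 : (n + 1) % 10 = 0 := by omega
      have hds : dsumN n = dsumN (n / 10) + 9 := by rw [dsumN_step n, h9]
      have h10 : (List.range 10).countP (fun d => dsumN (n / 10) + d == s)
          = (List.range 9).countP (fun d => dsumN (n / 10) + d == s)
            + (if (dsumN (n / 10) + 9 == s) then 1 else 0) := by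
        rw [show (10 : Nat) = 9 + 1 from rfl, List.range_succ, List.countP_append,
          List.countP_singleton]
      rw [hstep, ih, h1, h2, hS, h10, h9, ← hds]
      simp only [List.range_zero, List.countP_nil]
      ring
    · have h1 : (n + 1) / 10 = n / 10 := by omega
      have h2 : (n + 1) % 10 = n % 10 + 1 := by omega
      have hds : dsumN n = dsumN (n / 10) + n % 10 := dsumN_step n
      have hsp : (List.range (n % 10 + 1)).countP (fun d => dsumN (n / 10) + d == s)
          = (List.range (n % 10)).countP (fun d => dsumN (n / 10) + d == s)
            + (if (dsumN (n / 10) + n % 10 == s) then 1 else 0) := by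
        rw [List.range_succ (n := n % 10), List.countP_append, List.countP_singleton]
      rw [hstep, ih, h1, h2, hsp, ← hds]
      ring

-- the per-digit inner sum of B's comprehension, on the Nat side
theorem inner_sum_gen (l : List Nat) (m s : Nat) :
    ((l.filter (fun d => decide (d ≤ s))).map (fun d => cntN m (s - d))).sum
    = (l.map (fun d => (List.range m).countP (fun p => dsumN p + d == s))).sum := by
  induction l with
  | nil => rfl
  | cons d t ih =>
    by_cases hd : d ≤ s
    · rw [List.filter_cons_of_pos (by simpa using hd)]
      simp only [List.map_cons, List.sum_cons, ih]
      congr 1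
      unfold cntN
      exact countP_congr_mem _ _ _ (fun p _ => by
        by_cases hp : dsumN p = s - d
        · simp only [hp]
          have : s - d + d = s := by omega
          simp [this]
        · have : ¬ (dsumN p + d = s) := by omega
          simp [hp, this])
    · rw [List.filter_cons_of_neg (by simpa using hd)]
      simp only [List.map_cons, List.sum_cons, ih]
      have hz : (List.range m).countP (fun p => dsumN p + d == s) = 0 := by
        apply List.countP_eq_zero.mpr
        intro p _
        simp only [beq_iff_eq]
        omega
      omega

theorem cnt_zero_map :
    (List.range 91).map (fun s => ((cntN 0 s : Nat) : Int)) = List.replicate 91 0 := by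
  have hpt : ∀ s ∈ List.range 91, ((cntN 0 s : Nat) : Int) = (0 : Int) := by
    intro s _
    simp [cntN]
  rw [List.map_congr_left hpt, List.map_const', List.length_range]

theorem countsBelowGo_spec (fuel : Nat) : ∀ m : Nat, m ≤ fuel →
    countsBelowGo fuel (m : Int) = (List.range 91).map (fun s => ((cntN m s : Nat) : Int)) := by
  induction fuel with
  | zero =>
    intro m hm
    have hm0 : m = 0 := by omega
    subst hm0
    rw [show countsBelowGo 0 ((0 : Nat) : Int) = List.replicate 91 0 from rfl, cnt_zero_map]
  | succ fuel ih =>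
    intro m hm
    by_cases h0 : m = 0
    · subst h0
      simp only [Nat.cast_zero, countsBelowGo]
      rw [if_pos le_rfl, cnt_zero_map]
    · have hpos : 0 < m := Nat.pos_of_ne_zero h0
      have hneg : ¬ ((m : Int) ≤ 0) := by omega
      have hq : PySem.Int.floordiv (m : Int) 10 = ((m / 10 : Nat) : Int) := by
        exact_mod_cast PySem.Int.floordiv_natCast m 10
      have hr : PySem.Int.mod (m : Int) 10 = ((m % 10 : Nat) : Int) := by
        exact_mod_cast PySem.Int.mod_natCast m 10
      have hlt := Nat.div_lt_self hpos (by norm_num : 1 < 10)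
      simp only [countsBelowGo]
      rw [if_neg hneg]
      simp only [hq, hr]
      rw [ih (m / 10) (by omega), digitSumB_cast]
      rw [show ((91:Int)) = ((91:Nat):Int) from rfl, PySem.List.pyRange_zero_nat, List.map_map]
      apply List.map_congr_left
      intro s hs
      have hs91 : s < 91 := List.mem_range.mp hs
      simp only [Function.comp]
      rw [show ((10:Int)) = ((10:Nat):Int) from rfl, PySem.List.pyRange_zero_nat,
        List.filter_map, List.map_map]
      have hfp : ((fun d : Int => decide (d ≤ (s : Int))) ∘ (fun k : Nat => (k : Int)))
          = (fun d : Nat => decide (d ≤ s)) := by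
        funext d
        simp [Function.comp]
      rw [hfp]
      have hmapf : ∀ d ∈ (List.range 10).filter (fun d : Nat => decide (d ≤ s)),
          ((fun d : Int => PySem.List.pyGetD ((List.range 91).map
              (fun t => ((cntN (m / 10) t : Nat) : Int))) ((s : Int) - d) 0)
            ∘ (fun k : Nat => (k : Int))) d
          = ((cntN (m / 10) (s - d) : Nat) : Int) := by
        intro d hd
        have hds : d ≤ s := by
          have := (List.mem_filter.mp hd).2
          simpa using this
        have hcast : ((s : Int) - (d : Int)) = (((s - d : Nat)) : Int) := by
          omega
        simp only [Function.comp, hcast, PySem.List.pyGetD_natCast]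
        rw [PySem.List.getD_map_range _ _ _ _ (by omega)]
      rw [List.map_congr_left hmapf]
      rw [cntN_rec m s]
      have hsum : (((List.range 10).filter (fun d : Nat => decide (d ≤ s))).map
            (fun d => ((cntN (m / 10) (s - d) : Nat) : Int))).sum
          = ((((List.range 10).filter (fun d : Nat => decide (d ≤ s))).map
            (fun d => cntN (m / 10) (s - d))).sum : Int) := by
        rw [Nat.cast_list_sum, List.map_map]
        rfl
      rw [hsum, inner_sum_gen]
      have hite : (if ((dsumN (m / 10) : Nat) : Int) ≤ (s : Int)
            ∧ (s : Int) < ((dsumN (m / 10) : Nat) : Int) + ((m % 10 : Nat) : Int)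
          then (1 : Int) else 0)
          = (((List.range (m % 10)).countP (fun d => dsumN (m / 10) + d == s) : Nat) : Int) := by
        rw [countP_range_shift]
        by_cases hc : dsumN (m / 10) ≤ s ∧ s < dsumN (m / 10) + m % 10
        · rw [if_pos (by exact_mod_cast hc), if_pos hc]
          norm_num
        · rw [if_neg (by push_cast; omega), if_neg hc]
          norm_num
      rw [hite]
      push_cast
      ring

theorem countsBelow_spec (n : Nat) :
    countsBelow (n : Int) = (List.range 91).map (fun s => ((cntN n s : Nat) : Int)) := by
  unfold countsBelow
  rw [Int.toNat_natCast]
  exact countsBelowGo_spec n n le_rfl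

-- A's second loop: running (max, count-of-max) over a list of sizes
theorem foldl_maxcount (L : List Int) :
    L.foldl (fun (p : Int × Int) x =>
        if x > p.1 then (x, 1) else if x = p.1 then (p.1, p.2 + 1) else p) (0, 0)
    = (L.foldl max 0, ((L.count (L.foldl max 0) : Nat) : Int)) := by
  induction L using List.reverseRecOn with
  | nil => simp
  | append_singleton L x ih =>
    rw [List.foldl_append, List.foldl_append, ih]
    have hub := (PySem.List.le_foldl_max L 0).2
    have hcnt : ∀ v : Int, (L ++ [x]).count v = L.count v + (if (x == v) then 1 else 0) := by
      intro v
      rw [List.count_eq_countP, List.count_eq_countP, List.countP_append, List.countP_singleton]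
    simp only [List.foldl_cons, List.foldl_nil]
    rcases lt_trichotomy x (L.foldl max 0) with hlt | heq | hgt
    · rw [if_neg (by omega), if_neg (by omega), max_eq_left (le_of_lt hlt), hcnt]
      have hne : (x == L.foldl max 0) = false := by
        rw [beq_eq_false_iff_ne]
        omega
      rw [hne]
      simp
    · subst heq
      rw [if_neg (by omega), if_pos rfl, max_self, hcnt]
      simp only [BEq.rfl, if_true]
      push_cast
      ring_nf
    · rw [if_pos (by omega), max_eq_right (le_of_lt hgt), hcnt]
      have hzero : L.count x = 0 := by
        rw [List.count_eq_zero]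
        intro hmem
        have := hub x hmem
        omega
      rw [hzero]
      simp

-- beq of casts
theorem beq_natCast (a b : Nat) : (((a : Nat) : Int) == ((b : Nat) : Int)) = (a == b) := by
  by_cases h : a = b <;> simp [h]

-- proof-only abbreviations for A's dictionary
def keyf (k : Nat) : Int := ((dsumN (1 + k) : Nat) : Int)
def Pf (nn s : Nat) : Nat := (List.range nn).countP (fun k => dsumN (1 + k) == s)

def mymapD (nn : Nat) : PySem.Dict Int (List Int) :=
  (List.range nn).foldl (fun d k => d.modify (keyf k) [] (fun l => l ++ [1 + (k : Int)]))
    PySem.Dict.empty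

theorem portA_mymap (nn : Nat) :
    (PySem.List.pyRange 1 ((nn : Int) + 1) 1).foldl
      (fun d i => d.modify (digitSumA i) [] (fun l => l ++ [i])) PySem.Dict.empty
    = mymapD nn := by
  rw [PySem.List.pyRange_one, show ((nn : Int) + 1 - 1).toNat = nn by omega, List.foldl_map]
  apply PySem.List.foldl_congr_mem
  intro acc k _
  rw [show (1 + (k : Int)) = (((1 + k : Nat)) : Int) by push_cast; ring, digitSumA_cast]
  rfl

theorem portA_keys (nn : Nat) :
    (mymapD nn).keys = PySem.Set.ofList ((List.range nn).map keyf) := by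
  unfold mymapD
  rw [PySem.Dict.keys_foldl_modify_key (List.range nn) keyf []
      (fun _ k => fun l => l ++ [1 + (k : Int)]) PySem.Dict.empty]
  rw [PySem.Dict.keys_empty, PySem.Set.ofList_eq_foldl]
  rfl

theorem portA_size (nn t : Nat) :
    ((mymapD nn).getD ((t : Nat) : Int) []).length = Pf nn t := by
  unfold mymapD
  rw [show (fun (d : PySem.Dict Int (List Int)) (k : Nat) =>
        d.modify (keyf k) [] (fun l => l ++ [1 + (k : Int)]))
      = (fun (d : PySem.Dict Int (List Int)) (k : Nat) =>
          d.modify ((keyf k, 1 + (k : Int)).1) [] (fun l => l ++ [(keyf k, 1 + (k : Int)).2]))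
      from rfl]
  rw [← List.foldl_map (f := fun k : Nat => (keyf k, 1 + (k : Int)))
    (g := fun (d : PySem.Dict Int (List Int)) (p : Int × Int) =>
      d.modify p.1 [] (fun l => l ++ [p.2]))]
  rw [PySem.Dict.getD_foldl_modify_append, PySem.Dict.getD_empty, List.nil_append,
    List.filter_map, List.length_map, List.length_map]
  rw [← List.countP_eq_length_filter]
  unfold Pf
  apply countP_congr_mem
  intro k _
  show (keyf k == (t : Int)) = (dsumN (1 + k) == t)
  unfold keyf
  exact beq_natCast _ _

-- dsumN of anything ≤ 2^31 + 1 is below 91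
theorem dsumN_lt91 (m : Nat) (h : m ≤ 2147483649) : dsumN m < 91 := by
  have h10 : m < 10 ^ 10 := by
    have : (10 : Nat) ^ 10 = 10000000000 := by norm_num
    omega
  have := dsumN_le 10 m h10
  omega

-- ===== VERDICT (by name: the statement is the Claim_ definition above) =====
theorem largestGroup_spec : Claim_equal_largestGroup := by
  intro num hdom
  unfold Spec_largestGroup
  by_cases hnp : num ≤ 0
  · rw [largestGroup_alt, if_pos hnp]
    have hR : PySem.List.pyRange 1 (num + 1) 1 = [] := by
      rw [PySem.List.pyRange_one, show (num + 1 - 1).toNat = 0 by omega]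
      rfl
    simp only [largestGroup, hR, List.foldl_nil, PySem.Dict.keys_empty]
  · rw [not_le] at hnp
    obtain ⟨nn, rfl⟩ : ∃ nn : Nat, num = (nn : Int) := ⟨num.toNat, by omega⟩
    have hnn1 : 1 ≤ nn := by omega
    have hbound : nn ≤ 2147483648 := by
      unfold Dom_largestGroup pvDomInt at hdom
      have := of_decide_eq_true hdom
      omega
    have hne : ¬ ((nn : Int) ≤ 0) := by omega
    -- rewrite A into a fold over the list of group sizes
    simp only [largestGroup, portA_mymap]
    rw [← List.foldl_map
      (f := fun s : Int => (((mymapD nn).getD s []).length : Int))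
      (g := fun (p : Int × Int) x =>
        if x > p.1 then (x, 1) else if x = p.1 then (p.1, p.2 + 1) else p),
      foldl_maxcount]
    -- rewrite B into counts over the digit sums 0..90
    simp only [largestGroup_alt, if_neg hne]
    have hc0 : countsBelow ((nn : Int) + 1)
        = (List.range 91).map (fun s => ((cntN (nn + 1) s : Nat) : Int)) := by
      rw [show ((nn : Int) + 1) = (((nn + 1 : Nat)) : Int) by push_cast; ring]
      exact countsBelow_spec (nn + 1)
    have hsplit : ∀ s : Nat, cntN (nn + 1) s = Pf nn s + (if ((0 : Nat) == s) then 1 else 0) := by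
      intro s
      unfold cntN Pf
      rw [List.range_succ_eq_map, List.countP_cons, List.countP_map, dsumN_zero]
      have hcg : (List.range nn).countP ((fun i => dsumN i == s) ∘ Nat.succ)
          = (List.range nn).countP (fun k => dsumN (1 + k) == s) := by
        apply countP_congr_mem
        intro k _
        show (dsumN (k + 1) == s) = (dsumN (1 + k) == s)
        rw [Nat.add_comm]
      rw [hcg]
    have hget : PySem.List.pyGetD (countsBelow ((nn : Int) + 1)) 0 0
        = ((cntN (nn + 1) 0 : Nat) : Int) := by
      rw [hc0, show (0 : Int) = ((0 : Nat) : Int) from rfl, PySem.List.pyGetD_natCast]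
      exact PySem.List.getD_map_range _ 91 0 _ (by norm_num)
    have hc : (countsBelow ((nn : Int) + 1)).set 0
          (PySem.List.pyGetD (countsBelow ((nn : Int) + 1)) 0 0 - 1)
        = (List.range 91).map (fun s => ((Pf nn s : Nat) : Int)) := by
      rw [hget, hc0]
      apply List.ext_getElem
      · simp
      · intro j h1 h2
        rw [List.getElem_set]
        by_cases hj : 0 = j
        · rw [if_pos hj]
          simp only [List.getElem_map, List.getElem_range]
          rw [← hj, hsplit 0]
          simp only [BEq.rfl, if_true]
          push_cast
          ring
        · rw [if_neg hj]
          simp only [List.getElem_map, List.getElem_range]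
          rw [hsplit]
          have hb : (((0 : Nat)) == (j : Nat)) = false := by
            rw [beq_eq_false_iff_ne]
            omega
          rw [hb]
          simp
    rw [hc]
    -- name the two lists
    set f : Nat → Int := fun s => ((Pf nn s : Nat) : Int) with hf
    set g : Int → Int := fun s : Int => (((mymapD nn).getD s []).length : Int) with hg
    set K : List Int := (mymapD nn).keys with hK
    set c : List Int := (List.range 91).map f with hc'
    set L : List Int := K.map g with hL
    -- Python max(c) is the running max from 0 (first entry is a nonnegative cast)
    have hgt : ∀ t : Nat, g ((t : Nat) : Int) = f t := by
      intro t
      rw [hg, hf]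
      simp only []
      rw [portA_size]
    have hrange91 : c = f 0 :: ((List.range 90).map (fun s => f (s + 1))) := by
      rw [hc', show (91 : Nat) = 90 + 1 from rfl, List.range_succ_eq_map, List.map_cons,
        List.map_map]
      rfl
    have hmax : (PySem.List.max? c (fun v => v)).getD 0 = c.foldl max 0 := by
      rw [hrange91, PySem.List.max?_id_cons, Option.getD_some, List.foldl_cons]
      have hmx : max 0 (f 0) = f 0 := max_eq_right (by rw [hf]; positivity)
      rw [hmx]
    rw [hmax]
    -- membership facts for the key set
    have hmemK : ∀ x ∈ K, ∃ t : Nat, x = ((t : Nat) : Int) ∧ t < 91 ∧ Pf nn t ≠ 0 := by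
      intro x hx
      rw [hK, portA_keys, PySem.Set.mem_ofList] at hx
      obtain ⟨k, hk, rfl⟩ := List.mem_map.mp hx
      refine ⟨dsumN (1 + k), rfl, ?_, ?_⟩
      · exact dsumN_lt91 (1 + k) (by have := List.mem_range.mp hk; omega)
      · unfold Pf
        intro hzero
        have := List.countP_eq_zero.mp hzero k hk
        simp at this
    have hmemK' : ∀ t : Nat, Pf nn t ≠ 0 → ((t : Nat) : Int) ∈ K := by
      intro t ht
      rw [hK, portA_keys, PySem.Set.mem_ofList]
      have hex : ∃ k ∈ List.range nn, (dsumN (1 + k) == t) = true := by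
        by_contra hcontra
        push Not at hcontra
        exact ht (List.countP_eq_zero.mpr (fun k hk => by simp [hcontra k hk]))
      obtain ⟨k, hk, hbeq⟩ := hex
      refine List.mem_map.mpr ⟨k, hk, ?_⟩
      unfold keyf
      rw [beq_iff_eq] at hbeq
      rw [hbeq]
    have hKnodup : K.Nodup := by
      rw [hK, portA_keys]
      exact PySem.Set.nodup_ofList _
    -- the maximum group size is at least 1 (digit sum of 1 occurs)
    have hPf1 : Pf nn (dsumN (1 + 0)) ≠ 0 := by
      unfold Pf
      intro hzero
      have := List.countP_eq_zero.mp hzero 0 (List.mem_range.mpr (by omega))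
      simp at this
    have ht0lt : dsumN (1 + 0) < 91 := dsumN_lt91 (1 + 0) (by omega)
    have hmB1 : 1 ≤ c.foldl max 0 := by
      have hmem : f (dsumN (1 + 0)) ∈ c := by
        rw [hc']
        exact List.mem_map.mpr ⟨_, List.mem_range.mpr ht0lt, rfl⟩
      have hle := (PySem.List.le_foldl_max c 0).2 _ hmem
      have hge1 : (1 : Int) ≤ f (dsumN (1 + 0)) := by
        rw [hf]
        show (1 : Int) ≤ ((Pf nn (dsumN (1 + 0)) : Nat) : Int)
        exact_mod_cast Nat.one_le_iff_ne_zero.mpr hPf1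
      omega
    -- the two maxima agree
    have hMLB : L.foldl max 0 = c.foldl max 0 := by
      apply le_antisymm
      · rcases PySem.List.foldl_max_mem L 0 with h | h
        · rw [h]
          exact (PySem.List.le_foldl_max c 0).1
        · obtain ⟨x, hxK, hxg⟩ := List.mem_map.mp h
          obtain ⟨t, rfl, ht91, htP⟩ := hmemK x hxK
          rw [← hxg, hgt t]
          exact (PySem.List.le_foldl_max c 0).2 _
            (List.mem_map.mpr ⟨t, List.mem_range.mpr ht91, rfl⟩)
      · rcases PySem.List.foldl_max_mem c 0 with h | h
        · rw [h]
          exact (PySem.List.le_foldl_max L 0).1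
        · rw [hc'] at h
          obtain ⟨t, htr, hft⟩ := List.mem_map.mp h
          by_cases htP : Pf nn t = 0
          · have : c.foldl max 0 = 0 := by
              rw [← hft, hf]
              simp [htP]
            omega
          · rw [← hft, ← hgt t]
            exact (PySem.List.le_foldl_max L 0).2 _
              (List.mem_map.mpr ⟨((t : Nat) : Int), hmemK' t htP, rfl⟩)
    -- the tie counts agree
    have hcount : L.count (L.foldl max 0) = c.count (c.foldl max 0) := by
      rw [hMLB]
      set M : Int := c.foldl max 0 with hM
      -- A's side as a countP over the key set, transported to Nat
      have hcA : L.count M = (K.map Int.toNat).countP (fun t => f t == M) := by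
        rw [hL, List.count_eq_countP, List.countP_map, List.countP_map]
        apply countP_congr_mem
        intro x hx
        obtain ⟨t, rfl, _, _⟩ := hmemK x hx
        show (g ((t : Nat) : Int) == M) = (f (((t : Nat) : Int)).toNat == M)
        rw [hgt t, Int.toNat_natCast]
      -- B's side as a countP over range 91
      have hcB : c.count M = (List.range 91).countP (fun t => f t == M) := by
        rw [hc', List.count_eq_countP, List.countP_map]
        rfl
      rw [hcA, hcB]
      -- the key set (as naturals) is a permutation of the occupied digit sums below 91
      have hnodupKN : (K.map Int.toNat).Nodup := by
        apply List.Nodup.map_on _ hKnodup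
        intro x hx y hy hxy
        obtain ⟨t, rfl, _, _⟩ := hmemK x hx
        obtain ⟨u, rfl, _, _⟩ := hmemK y hy
        rw [Int.toNat_natCast, Int.toNat_natCast] at hxy
        rw [hxy]
      have hnodupFN : ((List.range 91).filter (fun t => decide (Pf nn t ≠ 0))).Nodup :=
        List.Nodup.filter _ (List.nodup_range)
      have hperm : (K.map Int.toNat).Perm
          ((List.range 91).filter (fun t => decide (Pf nn t ≠ 0))) := by
        rw [List.perm_ext_iff_of_nodup hnodupKN hnodupFN]
        intro t
        constructor
        · intro ht
          obtain ⟨x, hxK, rfl⟩ := List.mem_map.mp ht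
          obtain ⟨u, rfl, hu91, huP⟩ := hmemK x hxK
          rw [Int.toNat_natCast]
          rw [List.mem_filter]
          exact ⟨List.mem_range.mpr hu91, by simpa using huP⟩
        · intro ht
          rw [List.mem_filter] at ht
          have htP : Pf nn t ≠ 0 := by simpa using ht.2
          refine List.mem_map.mpr ⟨((t : Nat) : Int), hmemK' t htP, Int.toNat_natCast t⟩
      rw [hperm.countP_eq, List.countP_filter]
      -- a digit sum with an empty group never ties with the maximum (M ≥ 1)
      apply countP_congr_mem
      intro t _
      by_cases htP : Pf nn t = 0
      · have hfz : f t = 0 := by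
          rw [hf]
          simp [htP]
        have hne : (f t == M) = false := by
          rw [beq_eq_false_iff_ne, hfz]
          omega
        simp [hne]
      · simp [htP]
    show ((L.count (L.foldl max 0) : Nat) : Int) = _
    rw [hcount]
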